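-- pv_equiv track=rewrite | github.com/nikqime/homeworks | INDEPEND 6/2.py | all_nines
-- ===== SOURCE A (Python) =====
-- def all_nines(x):
--     if x % 2 == 0:
--         return -1
--     num_of_nines = 1
--     current_value = 9 % x
--     while current_value != 0:
--         num_of_nines += 1
--         current_value = (current_value * 10 + 9) % x
--     return int('9' * num_of_nines)
-- ===== SOURCE B (Python) =====
-- def all_nines(x):
--     if x % 2 == 0:
--         return -1
--     m = abs(x)
--     seen = {}
--     r = 1 % m
--     pos = 0
--     while r not in seen:
--         seen[r] = pos
--         r = r * 10 % m
--         pos += 1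
--     n = pos - seen[r]
--     return 10 ** n - 1
-- ===== Notes on version B (the rewrite author's own statement) =====
-- stated objective: alternative
-- what changed: B reframes the search as period-finding: it runs hash-map cycle detection on the orbit of 1 under r -> 10*r mod |x| (storing each remainder's first position in a dict and stopping at the first repeat, n = pos - seen[r]), instead of A's incremental divisibility recurrence on the repunit residue, and builds the result as 10**n - 1 instead of parsing the string '9'*n.
-- outside the precondition, e.g. on all_nines(5): A does not finish within the time limit, B returns 9
import Mathlib
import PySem

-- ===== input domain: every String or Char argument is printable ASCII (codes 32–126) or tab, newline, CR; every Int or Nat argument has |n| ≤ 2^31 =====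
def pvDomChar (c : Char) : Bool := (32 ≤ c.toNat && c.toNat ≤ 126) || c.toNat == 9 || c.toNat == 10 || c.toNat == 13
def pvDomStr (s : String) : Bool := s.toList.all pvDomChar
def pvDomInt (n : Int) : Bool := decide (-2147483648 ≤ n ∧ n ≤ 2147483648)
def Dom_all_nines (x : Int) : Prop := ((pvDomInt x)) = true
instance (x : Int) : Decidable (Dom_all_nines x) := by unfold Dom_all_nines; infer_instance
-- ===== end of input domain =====

-- B finds the answer by hash-map cycle detection on the orbit of 1 under r ↦ 10·r mod |x|
-- (period = smallest n with 10ⁿ ≡ 1, so the result is 10ⁿ−1) instead of A's divisibility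
-- recurrence on the repunit residue with string building ('alternative').


-- ===== PORT A =====
-- the while loop: while current_value != 0: num_of_nines += 1; current_value = (current_value*10+9) % x
-- (fuel-bounded to be total; inside Pre_ the fuel x.natAbs+1 is never exhausted)
def all_ninesLoopA (x : Int) (n : Nat) (cv : Int) : Nat → Nat
  | 0 => n
  | f + 1 => if cv = 0 then n else all_ninesLoopA x (n + 1) (PySem.Int.mod (cv * 10 + 9) x) f

-- int('9' * n): the argument is always a nonempty string of decimal digits; on such strings Python's
-- int() returns the base-10 value, which this fold computes exactly (the digit loop of the general
-- primitive PySem.Int.ofChars? is private to the prelude, so it is ported by hand here).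
def pyIntOfDigits (ds : List Char) : Int :=
  ds.foldl (fun a c => a * 10 + ((c.toNat - '0'.toNat : Nat) : Int)) 0

def all_nines (x : Int) : Int :=
  if PySem.Int.mod x 2 = 0 then -1
  else
    let n := all_ninesLoopA x 1 (PySem.Int.mod 9 x) (x.natAbs + 1)
    pyIntOfDigits (List.replicate n '9')

-- ===== PORT B =====
-- the while loop: while r not in seen: seen[r] = pos; r = r*10 % m; pos += 1
-- then n = pos - seen[r] (the lookup seen[r] cannot KeyError here, the loop just found r in seen,
-- so getD 0 is exact); fuel-bounded like A's loop, never exhausted inside Pre_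
def all_ninesLoopB (m : Int) (seen : PySem.Dict Int Int) (r : Int) (pos : Int) : Nat → Int
  | 0 => 0
  | f + 1 =>
    if seen.contains r then pos - seen.getD r 0
    else all_ninesLoopB m (seen.insert r pos) (PySem.Int.mod (r * 10) m) (pos + 1) f

def all_nines_alt (x : Int) : Int :=
  if PySem.Int.mod x 2 = 0 then -1
  else
    let m : Int := (x.natAbs : Int)
    let n := all_ninesLoopB m PySem.Dict.empty (PySem.Int.mod 1 m) 0 (x.natAbs + 1)
    10 ^ n.toNat - 1

-- ===== PRECONDITION & SPEC =====
-- Pre_ excludes exactly the odd multiples of 5: there Python A's while loop never terminates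
-- (no repunit of nines is divisible by such x), so A returns on no such input.
def Pre_all_nines (x : Int) : Prop := PySem.Int.mod x 2 = 0 ∨ ¬ (5:Int) ∣ x
instance (x : Int) : Decidable (Pre_all_nines x) := by unfold Pre_all_nines; infer_instance
def pvWitness_all_nines : Int := 7

def Spec_all_nines (x : Int) (out : Int) : Prop := out = all_nines_alt x
instance (x : Int) (out : Int) : Decidable (Spec_all_nines x out) := by unfold Spec_all_nines; infer_instance

-- ===== CLAIM (what is proved, stated in full; the proofs are below) =====
def Claim_equal_all_nines : Prop := ∀ (x : Int), Dom_all_nines x → Pre_all_nines x → Spec_all_nines x (all_nines x)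

-- ===== LEMMAS AND PROOFS =====

-- PySem.Int.mod is Int.fmod; reducing an argument mod x first does not change an affine combination mod x
theorem fmod_affine (a b c x : Int) : ((a.fmod x) * b + c).fmod x = (a * b + c).fmod x := by
  rw [Int.add_fmod, Int.mul_fmod, Int.fmod_fmod, ← Int.mul_fmod, ← Int.add_fmod]

theorem mod_affine (a b c x : Int) :
    PySem.Int.mod (PySem.Int.mod a x * b + c) x = PySem.Int.mod (a * b + c) x := by
  simp only [PySem.Int.mod]
  exact fmod_affine a b c x

-- int('9' * n) = 10^n - 1
theorem foldl_replicate_nine (n : Nat) : ∀ acc : Int,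
    (List.replicate n '9').foldl (fun a c => a * 10 + ((c.toNat - '0'.toNat : Nat) : Int)) acc
      = acc * 10 ^ n + (10 ^ n - 1) := by
  induction n with
  | zero => intro acc; simp
  | succ n ih =>
    intro acc
    rw [List.replicate_succ, List.foldl_cons, ih]
    have h9 : (('9'.toNat - '0'.toNat : Nat) : Int) = 9 := by decide
    rw [h9]; ring

theorem pyIntOfDigits_nines (n : Nat) : pyIntOfDigits (List.replicate n '9') = 10 ^ n - 1 := by
  unfold pyIntOfDigits
  rw [foldl_replicate_nine]
  ring

-- A's loop, started at n with the residue of the n-nines repunit, returns the minimal k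
theorem lemA (x : Int) (k : Nat)
    (hQk : ((x.natAbs : Int)) ∣ 10 ^ k - 1)
    (hmin : ∀ j, 1 ≤ j → j < k → ¬ ((x.natAbs : Int)) ∣ 10 ^ j - 1) :
    ∀ (f n : Nat), 1 ≤ n → n ≤ k → k < n + f →
      all_ninesLoopA x n (PySem.Int.mod ((10:Int) ^ n - 1) x) f = k := by
  intro f
  induction f with
  | zero => intro n _ _ _; omega
  | succ f ih =>
    intro n h1 hnk hkf
    have htest : (PySem.Int.mod ((10:Int) ^ n - 1) x = 0) ↔ ((x.natAbs : Int)) ∣ 10 ^ n - 1 := by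
      rw [PySem.Int.mod_eq_zero_iff_dvd, Int.natAbs_dvd]
    by_cases hn : n = k
    · subst hn
      simp only [all_ninesLoopA, if_pos (htest.mpr hQk)]
    · have hlt : n < k := lt_of_le_of_ne hnk hn
      have hne : ¬ PySem.Int.mod ((10:Int) ^ n - 1) x = 0 := fun h => hmin n h1 hlt (htest.mp h)
      simp only [all_ninesLoopA, if_neg hne]
      have hstep : PySem.Int.mod (PySem.Int.mod ((10:Int) ^ n - 1) x * 10 + 9) x
          = PySem.Int.mod ((10:Int) ^ (n + 1) - 1) x := by
        rw [mod_affine]; ring_nf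
      rw [hstep]
      exact ih (n + 1) (by omega) hlt (by omega)

-- B's loop invariant: after i iterations seen holds the pairs (10^j % m, j) for j < i in order
theorem lemB (m : Int) (hm : 0 < m) (k : Nat) (hk1 : 0 < k)
    (hQk : m ∣ 10 ^ k - 1)
    (hdis : ∀ i j : Nat, j < i → i < k → (10:Int) ^ i % m ≠ (10:Int) ^ j % m) :
    ∀ (f i : Nat) (seen : PySem.Dict Int Int), i ≤ k → k < i + f →
      seen.items = (List.range i).map (fun j : Nat => ((10:Int) ^ j % m, (j : Int))) →
      all_ninesLoopB m seen ((10:Int) ^ i % m) (i : Int) f = (k : Int) := by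
  intro f
  induction f with
  | zero => intro i _ _ _; omega
  | succ f ih =>
    intro i seen hik hkf hitems
    obtain ⟨l⟩ := seen
    replace hitems : l = (List.range i).map (fun j : Nat => ((10:Int) ^ j % m, (j : Int))) := hitems
    subst hitems
    by_cases hi : i = k
    · subst hi
      -- the current r equals the very first stored key 10^0 % m, stored at value 0
      have hr : (10:Int) ^ i % m = (10:Int) ^ 0 % m := by
        have h' : m ∣ 1 - (10:Int) ^ i := by
          rw [show (1:Int) - 10 ^ i = -(10 ^ i - 1) by ring]
          exact dvd_neg.mpr hQk
        have hmq : (10:Int) ^ i ≡ 1 [ZMOD m] := Int.modEq_iff_dvd.mpr h'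
        simpa [Int.ModEq] using hmq
      obtain ⟨k', rfl⟩ : ∃ k', i = k' + 1 := ⟨i - 1, by omega⟩
      have hget : (PySem.Dict.mk ((List.range (k' + 1)).map
          (fun j : Nat => ((10:Int) ^ j % m, (j : Int))))).get? ((10:Int) ^ (k' + 1) % m)
          = some 0 := by
        rw [hr, List.range_succ_eq_map]
        simp [PySem.Dict.get?_mk_cons]
      have hcon : (PySem.Dict.mk ((List.range (k' + 1)).map
          (fun j : Nat => ((10:Int) ^ j % m, (j : Int))))).contains ((10:Int) ^ (k' + 1) % m)
          = true := by
        rw [PySem.Dict.contains_eq_isSome_get?, hget]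
        rfl
      rw [all_ninesLoopB, if_pos hcon, PySem.Dict.getD_eq_get?_getD, hget]
      simp
    · have hlt : i < k := lt_of_le_of_ne hik hi
      have hnotmem : ((10:Int) ^ i % m) ∉
          ((List.range i).map (fun j : Nat => ((10:Int) ^ j % m, (j : Int)))).map Prod.fst := by
        simp only [List.map_map, List.mem_map, Function.comp]
        rintro ⟨j, hj, hje⟩
        exact hdis i j (List.mem_range.mp hj) hlt hje.symm
      have hnc : (PySem.Dict.mk ((List.range i).map (fun j : Nat => ((10:Int) ^ j % m, (j : Int))))).contains
          ((10:Int) ^ i % m) = false := by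
        rw [← Bool.not_eq_true, PySem.Dict.contains_iff_mem_keys]
        simpa [PySem.Dict.keys] using hnotmem
      rw [all_ninesLoopB, if_neg (by simp [hnc])]
      have hins : ((PySem.Dict.mk ((List.range i).map (fun j : Nat => ((10:Int) ^ j % m, (j : Int))))).insert
          ((10:Int) ^ i % m) (i : Int)).items
          = (List.range (i + 1)).map (fun j : Nat => ((10:Int) ^ j % m, (j : Int))) := by
        rw [PySem.Dict.items_insert_of_not_contains _ _ hnc, List.range_succ]
        simp
      have hrstep : PySem.Int.mod ((10:Int) ^ i % m * 10) m = (10:Int) ^ (i + 1) % m := by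
        rw [PySem.Int.mod_eq_emod_of_pos hm, Int.mul_emod, Int.emod_emod_of_dvd _ dvd_rfl,
          ← Int.mul_emod, ← pow_succ]
      have hpos : ((i : Int) + 1) = ((i + 1 : Nat) : Int) := by push_cast; ring
      rw [hrstep, hpos]
      exact ih (i + 1) _ hlt (by omega) hins

-- ===== VERDICT (by name: the statement is the Claim_ definition above) =====
theorem all_nines_spec : Claim_equal_all_nines := by
  unfold Claim_equal_all_nines Spec_all_nines
  intro x _ hpre
  by_cases he : PySem.Int.mod x 2 = 0
  · unfold all_nines all_nines_alt
    rw [if_pos he, if_pos he]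
  · have h5 : ¬ (5:Int) ∣ x := hpre.resolve_left he
    have h2 : ¬ (2:Int) ∣ x := fun h => he ((PySem.Int.mod_eq_zero_iff_dvd x 2).mpr h)
    have hx0 : x ≠ 0 := fun h => h2 (h ▸ dvd_zero 2)
    have hm : 0 < x.natAbs := Int.natAbs_pos.mpr hx0
    have hcop : Nat.Coprime 10 x.natAbs := by
      have hc2 : Nat.Coprime 2 x.natAbs :=
        (Nat.Prime.coprime_iff_not_dvd Nat.prime_two).mpr
          (fun h => h2 (Int.natAbs_dvd_natAbs.mp (by simpa using h)))
      have hc5 : Nat.Coprime 5 x.natAbs :=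
        (Nat.Prime.coprime_iff_not_dvd (by norm_num)).mpr
          (fun h => h5 (Int.natAbs_dvd_natAbs.mp (by simpa using h)))
      exact Nat.Coprime.mul_left hc2 hc5
    -- Euler: some power of ten is ≡ 1, so the minimal such exponent k exists
    have hEuler : 0 < Nat.totient x.natAbs ∧ ((x.natAbs : Int)) ∣ 10 ^ Nat.totient x.natAbs - 1 := by
      refine ⟨Nat.totient_pos.mpr hm, ?_⟩
      have heu : (10:Nat) ^ Nat.totient x.natAbs ≡ 1 [MOD x.natAbs] :=
        Nat.ModEq.pow_totient hcop
      have h1 : (1:Nat) ≤ 10 ^ Nat.totient x.natAbs := Nat.one_le_pow _ _ (by norm_num)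
      have hdvd : x.natAbs ∣ 10 ^ Nat.totient x.natAbs - 1 :=
        (Nat.modEq_iff_dvd' h1).mp heu.symm
      have hZ := Int.natCast_dvd_natCast.mpr hdvd
      push_cast [h1] at hZ
      rwa [Int.abs_eq_natAbs] at hZ
    have hex : ∃ n, 0 < n ∧ ((x.natAbs : Int)) ∣ 10 ^ n - 1 := ⟨_, hEuler⟩
    set k := Nat.find hex with hkdef
    obtain ⟨hk1, hQk⟩ := Nat.find_spec hex
    have hmin : ∀ j, 1 ≤ j → j < k → ¬ ((x.natAbs : Int)) ∣ 10 ^ j - 1 := by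
      intro j hj1 hjk hd
      exact Nat.find_min hex hjk ⟨hj1, hd⟩
    have hkm : k ≤ x.natAbs :=
      le_trans (Nat.find_min' hex hEuler) (Nat.totient_le _)
    have hdis : ∀ i j : Nat, j < i → i < k → (10:Int) ^ i % (x.natAbs : Int) ≠ (10:Int) ^ j % (x.natAbs : Int) := by
      intro i j hji hik heq
      have hmodeq : (x.natAbs : Int) ∣ (10:Int) ^ i - 10 ^ j :=
        Int.dvd_of_emod_eq_zero (Int.emod_emod_of_dvd _ dvd_rfl ▸
          Int.emod_eq_emod_iff_emod_sub_eq_zero.mp heq)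
      have hsplit : (10:Int) ^ i - 10 ^ j = 10 ^ j * (10 ^ (i - j) - 1) := by
        rw [mul_sub, mul_one, ← pow_add]
        congr 2
        omega
      have hco : IsCoprime ((x.natAbs : Int)) ((10:Int) ^ j) := by
        refine IsCoprime.pow_right ?_
        rw [Int.isCoprime_iff_gcd_eq_one]
        have hg : Int.gcd ((x.natAbs : Int)) 10 = Nat.gcd x.natAbs 10 := by
          simp [Int.gcd, Int.natAbs_abs]
        rw [hg]
        exact Nat.coprime_comm.mp hcop
      have hdj : ((x.natAbs : Int)) ∣ 10 ^ (i - j) - 1 :=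
        hco.dvd_of_dvd_mul_left (by rw [← hsplit]; exact hmodeq)
      exact hmin (i - j) (by omega) (by omega) hdj
    unfold all_nines all_nines_alt
    rw [if_neg he, if_neg he]
    have hA : all_ninesLoopA x 1 (PySem.Int.mod 9 x) (x.natAbs + 1) = k := by
      have h9 : (9:Int) = (10:Int) ^ 1 - 1 := by norm_num
      rw [h9]
      exact lemA x k hQk hmin (x.natAbs + 1) 1 le_rfl hk1 (by omega)
    have hB : all_ninesLoopB ((x.natAbs : Int)) PySem.Dict.empty
        (PySem.Int.mod 1 (x.natAbs : Int)) 0 (x.natAbs + 1) = (k : Int) := by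
      have hmZ : (0:Int) < (x.natAbs : Int) := by exact_mod_cast hm
      have h1 : PySem.Int.mod 1 ((x.natAbs : Int)) = (10:Int) ^ 0 % (x.natAbs : Int) := by
        rw [PySem.Int.mod_eq_emod_of_pos hmZ]; norm_num
      have h0 : (PySem.Dict.empty : PySem.Dict Int Int).items
          = (List.range 0).map (fun j : Nat => ((10:Int) ^ j % (x.natAbs : Int), (j : Int))) := by
        simp [PySem.Dict.empty]
      rw [h1]
      exact lemB ((x.natAbs : Int)) hmZ k hk1 hQk hdis (x.natAbs + 1) 0
        PySem.Dict.empty (by omega) (by omega) h0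
    show pyIntOfDigits (List.replicate (all_ninesLoopA x 1 (PySem.Int.mod 9 x) (x.natAbs + 1)) '9')
        = 10 ^ (all_ninesLoopB ((x.natAbs : Int)) PySem.Dict.empty
            (PySem.Int.mod 1 ((x.natAbs : Int))) 0 (x.natAbs + 1)).toNat - 1
    rw [hA, hB, pyIntOfDigits_nines]
    simp
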